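-- pv_equiv track=rewrite | github.com/raeez/chiral-bar-cobar | compute/scripts/_archive/_delete/sl3_bar_sign_test.py | _sort_with_sign
-- ===== SOURCE A (Python) =====
-- def _sort_with_sign(edges):
--     arr = list(edges)
--     swaps = 0
--     for i in range(len(arr)):
--         for j in range(len(arr) - 1 - i):
--             if arr[j] > arr[j+1]:
--                 arr[j], arr[j+1] = arr[j+1], arr[j]
--                 swaps += 1
--     return tuple(arr), (-1)**swaps
-- ===== SOURCE B (Python) =====
-- def _sort_with_sign(edges):
--     def msort(a):
--         if len(a) <= 1:
--             return a, 0
--         mid = len(a) // 2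
--         left, invl = msort(a[:mid])
--         right, invr = msort(a[mid:])
--         inv = invl + invr
--         merged = []
--         i = j = 0
--         while i < len(left) and j < len(right):
--             if left[i] <= right[j]:
--                 merged.append(left[i])
--                 i += 1
--             else:
--                 merged.append(right[j])
--                 j += 1
--                 inv += len(left) - i
--         merged.extend(left[i:])
--         merged.extend(right[j:])
--         return merged, inv
--     arr, inv = msort(list(edges))
--     return tuple(arr), (-1) ** inv
-- ===== Notes on version B (the rewrite author's own statement) =====
-- stated objective: faster
-- what changed: Replaces the in-place bubble sort (whose swap counter gives the sign) by a merge sort that counts inversions during merging; the sign is (-1)^inversions, which equals (-1)^swaps since each bubble swap removes exactly one inversion.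
import Mathlib
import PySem

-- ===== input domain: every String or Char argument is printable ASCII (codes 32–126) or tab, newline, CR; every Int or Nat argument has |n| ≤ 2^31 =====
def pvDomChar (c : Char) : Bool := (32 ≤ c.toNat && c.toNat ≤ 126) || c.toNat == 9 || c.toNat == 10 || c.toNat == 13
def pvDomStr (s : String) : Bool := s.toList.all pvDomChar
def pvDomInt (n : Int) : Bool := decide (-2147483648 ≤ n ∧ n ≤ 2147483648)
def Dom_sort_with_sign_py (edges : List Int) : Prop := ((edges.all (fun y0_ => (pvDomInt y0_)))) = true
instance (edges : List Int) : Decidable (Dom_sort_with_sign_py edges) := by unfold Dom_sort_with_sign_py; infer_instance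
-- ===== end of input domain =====

-- B replaces A's bubble sort (sign = (-1)^swaps) by a merge sort counting inversions
-- (sign = (-1)^inversions); proved to return the same pair on every input. A does not
-- mutate its argument (it copies it first), and neither does B.

-- ===== PORT A =====
-- one step of the inner loop body: compare arr[j], arr[j+1], swap and count
-- (indices visited are always in range, so getD's default is never read)
def pvStepA (st : List Int × Nat) (j : Nat) : List Int × Nat :=
  let a := st.1
  if a.getD (j+1) 0 < a.getD j 0 then
    (((a.set j (a.getD (j+1) 0)).set (j+1) (a.getD j 0)), st.2 + 1)
  else st

def sort_with_sign_py (edges : List Int) : List Int × Int :=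
  let n := edges.length
  let r := (List.range n).foldl
    (fun st i => (List.range (n - 1 - i)).foldl pvStepA st) (edges, 0)
  (r.1, (-1 : Int) ^ r.2)

-- ===== PORT B =====
-- merge two runs, counting cross inversions (the while-loop of Source B as structural
-- recursion; the Nat argument is fuel making the recursion structural — with fuel
-- l.length + r.length, as pvMerge supplies, the fuel-exhausted arm is never reached)
def pvMergeF : Nat → List Int → List Int → List Int × Nat
  | _, [], r => (r, 0)
  | _, l, [] => (l, 0)
  | 0, l, r => (l ++ r, 0)
  | n+1, x :: xs, y :: ys =>
    if x ≤ y then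
      let m := pvMergeF n xs (y :: ys); (x :: m.1, m.2)
    else
      let m := pvMergeF n (x :: xs) ys; (y :: m.1, m.2 + (x :: xs).length)

def pvMerge (l r : List Int) : List Int × Nat := pvMergeF (l.length + r.length) l r

-- msort of Source B; the Nat fuel makes the recursion structural (depth ≤ length)
def pvMsortF : Nat → List Int → List Int × Nat
  | 0, a => (a, 0)
  | n+1, a =>
    if a.length ≤ 1 then (a, 0)
    else
      let mid := a.length / 2
      let l := pvMsortF n (a.take mid)
      let r := pvMsortF n (a.drop mid)
      let m := pvMerge l.1 r.1
      (m.1, l.2 + r.2 + m.2)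

def pvMsort (a : List Int) : List Int × Nat := pvMsortF a.length a

def sort_with_sign_py_alt (edges : List Int) : List Int × Int :=
  let r := pvMsort edges
  (r.1, (-1 : Int) ^ r.2)

-- ===== PRECONDITION & SPEC =====
def Spec_sort_with_sign_py (edges : List Int) (out : List Int × Int) : Prop := out = sort_with_sign_py_alt edges
instance (edges : List Int) (out : List Int × Int) : Decidable (Spec_sort_with_sign_py edges out) := by unfold Spec_sort_with_sign_py; infer_instance

-- ===== CLAIM (what is proved, stated in full; the proofs are below) =====
def Claim_equal_sort_with_sign_py : Prop := ∀ (edges : List Int), Dom_sort_with_sign_py edges → Spec_sort_with_sign_py edges (sort_with_sign_py edges)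

-- ===== LEMMAS AND PROOFS =====

-- number of inversions (pairs out of order), head-recursively
def invCount : List Int → Nat
  | [] => 0
  | x :: t => t.countP (fun y => decide (y < x)) + invCount t

-- cross inversions between a left and a right block
def cross (l r : List Int) : Nat :=
  (l.map (fun x => r.countP (fun y => decide (y < x)))).sum

-- one bubble pass over a whole list, structurally
def pvPass : List Int → List Int × Nat
  | x :: y :: t =>
    if y < x then
      let p := pvPass (x :: t); (y :: p.1, p.2 + 1)
    else
      let p := pvPass (y :: t); (x :: p.1, p.2)
  | l => (l, 0)

-- bubble sort as repeated passes over shrinking prefixes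
def pvBub : Nat → List Int → List Int × Nat
  | 0, l => (l, 0)
  | m+1, l =>
    let p := pvPass (l.take (m+1))
    let q := pvBub m (p.1 ++ l.drop (m+1))
    (q.1, p.2 + q.2)

-- ---- generic list facts ----
theorem getD_append_add (p l : List Int) (i : Nat) (d : Int) :
    (p ++ l).getD (p.length + i) d = l.getD i d := by
  simp [List.getD_eq_getElem?_getD, List.getElem?_append_right (Nat.le_add_right p.length i)]

theorem set_append_add (p l : List Int) (i : Nat) (v : Int) :
    (p ++ l).set (p.length + i) v = p ++ l.set i v := by
  rw [List.set_append, if_neg (by omega)]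
  simp

theorem invCount_append (l r : List Int) :
    invCount (l ++ r) = invCount l + invCount r + cross l r := by
  induction l with
  | nil => simp [invCount, cross]
  | cons x t ih =>
    simp only [List.cons_append, invCount, cross, List.map_cons, List.sum_cons,
      List.countP_append] at ih ⊢
    omega

theorem cross_cons_right (l : List Int) (y : Int) (ys : List Int) :
    cross l (y :: ys) = l.countP (fun z => decide (y < z)) + cross l ys := by
  induction l with
  | nil => simp [cross]
  | cons a t ih =>
    simp only [cross, List.map_cons, List.sum_cons, List.countP_cons] at ih ⊢
    split_ifs <;> omega

theorem cross_perm_left {l l' : List Int} (h : l.Perm l') (r : List Int) :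
    cross l r = cross l' r := (h.map _).sum_eq

theorem cross_perm_right (l : List Int) {r r' : List Int} (h : r.Perm r') :
    cross l r = cross l r' := by
  unfold cross
  exact congrArg List.sum (List.map_congr_left (fun x _ => h.countP_eq _))

theorem invCount_append_singleton (q : List Int) (M : Int) (h : ∀ x ∈ q, x ≤ M) :
    invCount (q ++ [M]) = invCount q := by
  rw [invCount_append]
  have h1 : invCount [M] = 0 := by simp [invCount]
  have h2 : cross q [M] = 0 := by
    unfold cross
    apply List.sum_eq_zero
    intro n hn
    simp only [List.mem_map] at hn
    obtain ⟨x, hx, rfl⟩ := hn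
    simp [not_lt.mpr (h x hx)]
  omega

-- ---- pvPass facts ----
theorem pvPass_cons_perm (t : List Int) : ∀ c, (pvPass (c :: t)).1.Perm (c :: t) := by
  induction t with
  | nil => intro c; simp [pvPass]
  | cons y t ih =>
    intro c
    by_cases h : y < c
    · simp only [pvPass, if_pos h]
      exact ((ih c).cons y).trans (List.Perm.swap c y t)
    · simp only [pvPass, if_neg h]
      exact (ih y).cons c

theorem pvPass_perm (l : List Int) : (pvPass l).1.Perm l := by
  cases l with
  | nil => simp [pvPass]
  | cons c t => exact pvPass_cons_perm t c

theorem pvPass_cons_inv (t : List Int) :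
    ∀ c, invCount (pvPass (c :: t)).1 + (pvPass (c :: t)).2 = invCount (c :: t) := by
  induction t with
  | nil => intro c; simp [pvPass, invCount]
  | cons y t ih =>
    intro c
    by_cases h : y < c
    · have hc := (pvPass_cons_perm t c).countP_eq (fun z => decide (z < y))
      have ihc := ih c
      simp only [pvPass, if_pos h, invCount]
      rw [hc]
      simp only [invCount, List.countP_cons, decide_eq_true_eq] at ihc ⊢
      split_ifs <;> omega
    · have hc := (pvPass_cons_perm t y).countP_eq (fun z => decide (z < c))
      have ihc := ih y
      simp only [pvPass, if_neg h, invCount]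
      rw [hc]
      simp only [invCount, List.countP_cons, decide_eq_true_eq] at ihc ⊢
      split_ifs <;> omega

theorem pvPass_inv (l : List Int) : invCount (pvPass l).1 + (pvPass l).2 = invCount l := by
  cases l with
  | nil => simp [pvPass, invCount]
  | cons c t => exact pvPass_cons_inv t c

theorem pvPass_max (t : List Int) :
    ∀ x, ∃ q M, (pvPass (x :: t)).1 = q ++ [M] ∧ (∀ z ∈ q, z ≤ M) ∧ x ≤ M := by
  induction t with
  | nil => intro x; exact ⟨[], x, by simp [pvPass], by simp, le_refl x⟩
  | cons y t ih =>
    intro x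
    by_cases h : y < x
    · obtain ⟨q, M, h1, h2, h3⟩ := ih x
      refine ⟨y :: q, M, ?_, ?_, h3⟩
      · simp only [pvPass, if_pos h, h1]; simp
      · intro z hz
        rcases List.mem_cons.mp hz with rfl | hz
        · exact le_of_lt (lt_of_lt_of_le h h3)
        · exact h2 z hz
    · obtain ⟨q, M, h1, h2, h3⟩ := ih y
      refine ⟨x :: q, M, ?_, ?_, le_trans (not_lt.mp h) h3⟩
      · simp only [pvPass, if_neg h, h1]; simp
      · intro z hz
        rcases List.mem_cons.mp hz with rfl | hz
        · exact le_trans (not_lt.mp h) h3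
        · exact h2 z hz

-- ---- pvBub facts ----
theorem pvBub_perm (m : Nat) : ∀ l : List Int, (pvBub m l).1.Perm l := by
  induction m with
  | zero => intro l; simp [pvBub]
  | succ m ih =>
    intro l
    simp only [pvBub]
    have hp : ((pvPass (l.take (m+1))).1 ++ l.drop (m+1)).Perm l := by
      have h0 := (pvPass_perm (l.take (m+1))).append_right (l.drop (m+1))
      rwa [List.take_append_drop] at h0
    exact (ih _).trans hp

theorem pvBub_append (m : Nat) : ∀ (q s : List Int), m ≤ q.length →
    pvBub m (q ++ s) = ((pvBub m q).1 ++ s, (pvBub m q).2) := by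
  induction m with
  | zero => intro q s _; simp [pvBub]
  | succ m ih =>
    intro q s h
    simp only [pvBub]
    rw [List.take_append_of_le_length h, List.drop_append_of_le_length h,
      ← List.append_assoc]
    have hlen : m ≤ ((pvPass (q.take (m+1))).1 ++ q.drop (m+1)).length := by
      have h1 : (pvPass (q.take (m+1))).1.length = (q.take (m+1)).length :=
        (pvPass_perm _).length_eq
      simp [h1]
      omega
    rw [ih _ _ hlen]

theorem pvBub_sorted_swaps (m : Nat) : ∀ l : List Int, l.length = m →
    (pvBub m l).1.Pairwise (· ≤ ·) ∧ (pvBub m l).2 = invCount l := by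
  induction m with
  | zero =>
    intro l h
    rw [List.length_eq_zero_iff] at h
    subst h
    simp [pvBub, invCount]
  | succ m ih =>
    intro l h
    cases l with
    | nil => simp at h
    | cons c t =>
      obtain ⟨q, M, h1, h2, _⟩ := pvPass_max t c
      have htake : (c :: t).take (m+1) = c :: t := by
        rw [← h]; exact List.take_length
      have hdrop : (c :: t).drop (m+1) = [] := by
        rw [← h]; exact List.drop_length
      have hq : q.length = m := by
        have := (pvPass_perm (c :: t)).length_eq
        rw [h1] at this
        simp at this
        simp at h
        omega
      have hM : ∀ x ∈ q ++ [M], x ≤ M := by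
        intro x hx
        rcases List.mem_append.mp hx with hx | hx
        · exact h2 x hx
        · simp at hx; omega
      simp only [pvBub, htake, hdrop, List.append_nil, h1]
      rw [pvBub_append m q [M] (le_of_eq hq.symm)]
      obtain ⟨ihs, ihc⟩ := ih q hq
      constructor
      · rw [List.pairwise_append]
        refine ⟨ihs, List.pairwise_singleton _ _, ?_⟩
        intro a ha b hb
        simp at hb
        subst hb
        exact h2 a ((pvBub_perm m q).mem_iff.mp ha)
      · have hinv := pvPass_inv (c :: t)
        rw [h1, invCount_append_singleton q M h2] at hinv
        omega

theorem pvBub_sorted (m : Nat) (l : List Int) (h : l.length = m) :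
    (pvBub m l).1.Pairwise (· ≤ ·) := (pvBub_sorted_swaps m l h).1

theorem pvBub_swaps (m : Nat) (l : List Int) (h : l.length = m) :
    (pvBub m l).2 = invCount l := (pvBub_sorted_swaps m l h).2

-- ---- A's index loops = structural bubble sort ----
theorem inner_eq (k : Nat) : ∀ (p rest : List Int) (s : Nat), k + 1 ≤ rest.length →
    (List.range' p.length k).foldl pvStepA (p ++ rest, s)
      = (p ++ (pvPass (rest.take (k+1))).1 ++ rest.drop (k+1),
         s + (pvPass (rest.take (k+1))).2) := by
  induction k with
  | zero =>
    intro p rest s h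
    cases rest with
    | nil => simp at h
    | cons x t => simp [pvPass]
  | succ k ih =>
    intro p rest s h
    cases rest with
    | nil => simp at h
    | cons x r =>
      cases r with
      | nil => simp at h
      | cons y t =>
        have g0 : (p ++ x :: y :: t).getD p.length 0 = x := by
          simpa using getD_append_add p (x :: y :: t) 0 0
        have g1 : (p ++ x :: y :: t).getD (p.length + 1) 0 = y := by
          simpa using getD_append_add p (x :: y :: t) 1 0
        rw [List.range'_succ, List.foldl_cons]
        by_cases hxy : y < x
        · have hstep : pvStepA (p ++ x :: y :: t, s) p.length
              = ((p ++ [y]) ++ x :: t, s + 1) := by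
            simp only [pvStepA, g0, g1, if_pos hxy]
            have s0 : (p ++ x :: y :: t).set p.length y = p ++ y :: y :: t := by
              simpa using set_append_add p (x :: y :: t) 0 y
            have s1 : (p ++ y :: y :: t).set (p.length + 1) x = p ++ y :: x :: t := by
              simpa using set_append_add p (y :: y :: t) 1 x
            rw [s0, s1]
            simp
          rw [hstep]
          have hlen : k + 1 ≤ (x :: t).length := by
            simp only [List.length_cons] at h ⊢; omega
          have hih := ih (p ++ [y]) (x :: t) (s + 1) hlen
          simp only [List.length_append, List.length_cons, List.length_nil] at hih
          rw [hih]
          simp only [List.take_succ_cons, List.drop_succ_cons, pvPass, if_pos hxy]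
          simp [List.append_assoc]
          omega
        · have hstep : pvStepA (p ++ x :: y :: t, s) p.length
              = ((p ++ [x]) ++ y :: t, s) := by
            simp only [pvStepA, g0, g1, if_neg hxy]
            simp
          rw [hstep]
          have hlen : k + 1 ≤ (y :: t).length := by
            simp only [List.length_cons] at h ⊢; omega
          have hih := ih (p ++ [x]) (y :: t) s hlen
          simp only [List.length_append, List.length_cons, List.length_nil] at hih
          rw [hih]
          simp only [List.take_succ_cons, List.drop_succ_cons, pvPass, if_neg hxy]
          simp [List.append_assoc]

theorem outer_eq (m : Nat) : ∀ (l : List Int) (s : Nat) (n : Nat),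
    l.length = n → m ≤ n →
    (List.range' (n - m) m).foldl
        (fun st i => (List.range (n - 1 - i)).foldl pvStepA st) (l, s)
      = ((pvBub m l).1, s + (pvBub m l).2) := by
  induction m with
  | zero => intro l s n hl hm; simp [pvBub]
  | succ m ih =>
    intro l s n hl hm
    rw [List.range'_succ, List.foldl_cons]
    have hidx : n - 1 - (n - (m+1)) = m := by omega
    have hinner := inner_eq m [] l s (by omega)
    simp only [List.nil_append, List.length_nil] at hinner
    rw [hidx, (List.range_eq_range' : List.range m = List.range' 0 m), hinner]
    have hl2 : ((pvPass (l.take (m+1))).1 ++ l.drop (m+1)).length = n := by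
      have h1 : (pvPass (l.take (m+1))).1.length = (l.take (m+1)).length :=
        (pvPass_perm _).length_eq
      simp [h1]
      omega
    have hrange : n - (m+1) + 1 = n - m := by omega
    rw [hrange, ih _ _ n hl2 (by omega)]
    simp only [pvBub]
    simp [Nat.add_assoc]

theorem portA_eq (edges : List Int) :
    sort_with_sign_py edges
      = ((pvBub edges.length edges).1, (-1 : Int) ^ (pvBub edges.length edges).2) := by
  have h := outer_eq edges.length edges 0 edges.length rfl (le_refl _)
  simp only [Nat.sub_self, List.range_eq_range'] at h
  simp only [sort_with_sign_py, List.range_eq_range']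
  rw [h]
  simp

-- ---- B's merge sort facts ----
theorem pvMergeF_perm (n : Nat) : ∀ l r : List Int, (pvMergeF n l r).1.Perm (l ++ r) := by
  induction n with
  | zero =>
    intro l r
    cases l with
    | nil => simp [pvMergeF]
    | cons x xs => cases r with
      | nil => simp [pvMergeF]
      | cons y ys => simp [pvMergeF]
  | succ n ih =>
    intro l r
    cases l with
    | nil => simp [pvMergeF]
    | cons x xs =>
      cases r with
      | nil => simp [pvMergeF]
      | cons y ys =>
        by_cases hxy : x ≤ y
        · simp only [pvMergeF, if_pos hxy]
          exact (ih xs (y :: ys)).cons x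
        · simp only [pvMergeF, if_neg hxy]
          exact ((ih (x :: xs) ys).cons y).trans List.perm_middle.symm

theorem pvMerge_perm (l r : List Int) : (pvMerge l r).1.Perm (l ++ r) :=
  pvMergeF_perm _ l r

theorem pvMergeF_sorted (n : Nat) : ∀ l r : List Int, l.length + r.length ≤ n →
    l.Pairwise (· ≤ ·) → r.Pairwise (· ≤ ·) → (pvMergeF n l r).1.Pairwise (· ≤ ·) := by
  induction n with
  | zero =>
    intro l r h _ _
    rw [List.length_eq_zero_iff.mp (by omega : l.length = 0),
      List.length_eq_zero_iff.mp (by omega : r.length = 0)]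
    simp [pvMergeF]
  | succ n ih =>
    intro l r h hl hr
    cases l with
    | nil => simpa [pvMergeF] using hr
    | cons x xs =>
      cases r with
      | nil => simpa [pvMergeF] using hl
      | cons y ys =>
        simp only [List.length_cons] at h
        by_cases hxy : x ≤ y
        · simp only [pvMergeF, if_pos hxy]
          rw [List.pairwise_cons]
          constructor
          · intro b hb
            have hb' := (pvMergeF_perm n xs (y :: ys)).mem_iff.mp hb
            rcases List.mem_append.mp hb' with h1 | h1
            · exact (List.pairwise_cons.mp hl).1 b h1
            · rcases List.mem_cons.mp h1 with rfl | h1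
              · exact hxy
              · exact le_trans hxy ((List.pairwise_cons.mp hr).1 b h1)
          · exact ih xs (y :: ys) (by simp; omega) (List.pairwise_cons.mp hl).2 hr
        · simp only [pvMergeF, if_neg hxy]
          rw [List.pairwise_cons]
          have hyx : y ≤ x := le_of_lt (not_le.mp hxy)
          constructor
          · intro b hb
            have hb' := (pvMergeF_perm n (x :: xs) ys).mem_iff.mp hb
            rcases List.mem_append.mp hb' with h1 | h1
            · rcases List.mem_cons.mp h1 with rfl | h1
              · exact hyx
              · exact le_trans hyx ((List.pairwise_cons.mp hl).1 b h1)
            · exact (List.pairwise_cons.mp hr).1 b h1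
          · exact ih (x :: xs) ys (by simp; omega) hl (List.pairwise_cons.mp hr).2

theorem pvMerge_sorted (l r : List Int) (hl : l.Pairwise (· ≤ ·)) (hr : r.Pairwise (· ≤ ·)) :
    (pvMerge l r).1.Pairwise (· ≤ ·) :=
  pvMergeF_sorted _ l r (le_refl _) hl hr

theorem pvMergeF_count (n : Nat) : ∀ l r : List Int, l.length + r.length ≤ n →
    l.Pairwise (· ≤ ·) → r.Pairwise (· ≤ ·) → (pvMergeF n l r).2 = cross l r := by
  induction n with
  | zero =>
    intro l r h _ _
    rw [List.length_eq_zero_iff.mp (by omega : l.length = 0),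
      List.length_eq_zero_iff.mp (by omega : r.length = 0)]
    simp [pvMergeF, cross]
  | succ n ih =>
    intro l r h hl hr
    cases l with
    | nil => simp [pvMergeF, cross]
    | cons x xs =>
      cases r with
      | nil => simp [pvMergeF, cross]
      | cons y ys =>
        simp only [List.length_cons] at h
        by_cases hxy : x ≤ y
        · simp only [pvMergeF, if_pos hxy]
          have hz : (y :: ys).countP (fun z => decide (z < x)) = 0 := by
            rw [List.countP_eq_zero]
            intro a ha
            rcases List.mem_cons.mp ha with rfl | ha
            · simp; omega
            · have := (List.pairwise_cons.mp hr).1 a ha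
              simp; omega
          have hcx : cross (x :: xs) (y :: ys)
              = (y :: ys).countP (fun z => decide (z < x)) + cross xs (y :: ys) := by
            simp [cross]
          rw [hcx, hz, ih xs (y :: ys) (by simp; omega) (List.pairwise_cons.mp hl).2 hr]
          omega
        · simp only [pvMergeF, if_neg hxy]
          have hyx : y < x := not_le.mp hxy
          have hc : (x :: xs).countP (fun z => decide (y < z)) = (x :: xs).length := by
            rw [List.countP_eq_length]
            intro a ha
            rcases List.mem_cons.mp ha with rfl | ha
            · simp; omega
            · have := (List.pairwise_cons.mp hl).1 a ha
              simp; omega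
          rw [cross_cons_right, hc,
            ih (x :: xs) ys (by simp; omega) hl (List.pairwise_cons.mp hr).2]
          omega

theorem pvMerge_count (l r : List Int) (hl : l.Pairwise (· ≤ ·)) (hr : r.Pairwise (· ≤ ·)) :
    (pvMerge l r).2 = cross l r :=
  pvMergeF_count _ l r (le_refl _) hl hr

theorem pvMsortF_correct (n : Nat) : ∀ a : List Int, a.length ≤ n →
    (pvMsortF n a).1.Perm a ∧ (pvMsortF n a).1.Pairwise (· ≤ ·)
      ∧ (pvMsortF n a).2 = invCount a := by
  induction n with
  | zero =>
    intro a h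
    rw [List.length_eq_zero_iff.mp (by omega : a.length = 0)]
    simp [pvMsortF, invCount]
  | succ n ih =>
    intro a h
    by_cases h1 : a.length ≤ 1
    · simp only [pvMsortF, if_pos h1]
      match a, h1 with
      | [], _ => simp [invCount]
      | [x], _ => simp [invCount]
    · simp only [pvMsortF, if_neg h1]
      have hmid : a.length / 2 ≤ n ∧ a.length - a.length / 2 ≤ n := by omega
      obtain ⟨p1, s1, c1⟩ := ih (a.take (a.length / 2)) (by simp; omega)
      obtain ⟨p2, s2, c2⟩ := ih (a.drop (a.length / 2)) (by simp; omega)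
      have hperm : (pvMerge (pvMsortF n (a.take (a.length / 2))).1
          (pvMsortF n (a.drop (a.length / 2))).1).1.Perm a := by
        have h0 := (pvMerge_perm _ _).trans (p1.append p2)
        rwa [List.take_append_drop] at h0
      have hcnt : (pvMerge (pvMsortF n (a.take (a.length / 2))).1
            (pvMsortF n (a.drop (a.length / 2))).1).2
          = cross (a.take (a.length / 2)) (a.drop (a.length / 2)) := by
        rw [pvMerge_count _ _ s1 s2, cross_perm_left p1, cross_perm_right _ p2]
      refine ⟨hperm, pvMerge_sorted _ _ s1 s2, ?_⟩
      rw [hcnt, c1, c2]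
      have h0 := invCount_append (a.take (a.length / 2)) (a.drop (a.length / 2))
      rw [List.take_append_drop] at h0
      omega

theorem pvMsort_correct (a : List Int) :
    (pvMsort a).1.Perm a ∧ (pvMsort a).1.Pairwise (· ≤ ·) ∧ (pvMsort a).2 = invCount a :=
  pvMsortF_correct a.length a (le_refl _)

-- ===== VERDICT (by name: the statement is the Claim_ definition above) =====
theorem sort_with_sign_py_spec : Claim_equal_sort_with_sign_py := by
  intro edges _
  unfold Spec_sort_with_sign_py sort_with_sign_py_alt
  rw [portA_eq]
  obtain ⟨hperm, hsort, hinv⟩ := pvMsort_correct edges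
  have h1 : (pvBub edges.length edges).1 = (pvMsort edges).1 :=
    List.Perm.eq_of_pairwise' (pvBub_sorted _ _ rfl) hsort
      ((pvBub_perm _ _).trans hperm.symm)
  have h2 : (pvBub edges.length edges).2 = (pvMsort edges).2 := by
    rw [pvBub_swaps _ _ rfl, hinv]
  simp [h1, h2]
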